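-- pv_equiv track=rewrite | github.com/TimS-ml/My-Algo | Educative/ap12_WordConcatenation.py | find_word_concatenation
-- ===== SOURCE A (Python) =====
-- def find_word_concatenation(arr, words):
--     freqArr, freqWord = {}, {}
--     for w in words:
--         freqWord[w] = freqWord.get(w, 0) + 1
--
--     l, r = 0, 0
--     valid = 0
--     ans = []
--     while r < len(arr):
--         w = arr[r]
--         r += 1
--
--         if w in freqWord:
--             freqArr[w] = freqArr.get(w, 0) + 1
--
--             if freqArr[w] == freqWord[w]:
--                 valid += 1
--
--         if valid == len(freqWord):
--             ans.append(l)
--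
--         if r >= len(words):
--             d = arr[l]
--             l += 1
--
--             if d in freqWord:
--                 if freqArr[d] == freqWord[d]:
--                     valid -= 1
--                 freqArr[d] -= 1
--
--     return ans
-- ===== SOURCE B (Python) =====
-- def find_word_concatenation(arr, words):
--     k = len(words)
--     target = sorted(words)
--     return [i for i in range(len(arr))
--             if len(arr[i:i + k]) == k and sorted(arr[i:i + k]) == target]
-- ===== Notes on version B (the rewrite author's own statement) =====
-- stated objective: simpler
-- what changed: Replaces A's incremental sliding window (counter dict plus valid-count bookkeeping with per-step add/remove updates) by a 5-line direct scan that, for each start index, recomputes the window slice and compares its sorted contents against sorted(words); B trades speed for brevity (slower on large inputs).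
import Mathlib
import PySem

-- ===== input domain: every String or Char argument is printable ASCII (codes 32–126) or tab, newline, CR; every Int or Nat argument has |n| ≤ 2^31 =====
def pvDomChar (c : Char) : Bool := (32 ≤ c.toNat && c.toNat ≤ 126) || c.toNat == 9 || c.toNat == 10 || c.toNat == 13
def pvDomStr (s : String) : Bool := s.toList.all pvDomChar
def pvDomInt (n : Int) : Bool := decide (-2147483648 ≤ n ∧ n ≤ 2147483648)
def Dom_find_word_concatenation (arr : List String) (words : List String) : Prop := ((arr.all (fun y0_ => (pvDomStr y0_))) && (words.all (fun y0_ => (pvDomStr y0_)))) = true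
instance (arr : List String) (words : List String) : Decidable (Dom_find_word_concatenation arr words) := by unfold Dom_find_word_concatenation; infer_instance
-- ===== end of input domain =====

-- B replaces A's incremental valid-counter sliding window by a direct scan that
-- recomputes each window's sorted multiset and compares it to sorted(words)
-- (objective: simpler; not faster).

-- ===== PORT A =====
-- the while loop of A; fuel = number of remaining iterations (the loop runs exactly
-- len(arr) iterations: r increases by 1 each pass), so initial fuel arr.length is exact
def findLoopA (arr : List String) (freqWord : PySem.Dict String Int) (wlen : Nat) :
    Nat → PySem.Dict String Int → Nat → Nat → Int → List Int → List Int
  | 0, _, _, _, _, ans => ans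
  | fuel+1, freqArr, l, r, valid, ans =>
    if h : r < arr.length then
      let w := arr[r]
      let (freqArr, valid) :=
        if freqWord.contains w then
          let freqArr := freqArr.insert w (freqArr.getD w 0 + 1)
          (freqArr, if freqArr.getD w 0 == freqWord.getD w 0 then valid + 1 else valid)
        else (freqArr, valid)
      let ans := if valid == (freqWord.size : Int) then ans ++ [(l : Int)] else ans
      if r + 1 ≥ wlen then
        -- arr[l]: l < r + 1 ≤ len(arr) always, so the default of getD is never used
        let d := arr.getD l ""
        let (freqArr, valid) :=
          if freqWord.contains d then
            -- freqArr[d] -= 1: d is in the window and in freqWord, so the key exists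
            (freqArr.insert d (freqArr.getD d 0 - 1),
             if freqArr.getD d 0 == freqWord.getD d 0 then valid - 1 else valid)
          else (freqArr, valid)
        findLoopA arr freqWord wlen fuel freqArr (l + 1) (r + 1) valid ans
      else
        findLoopA arr freqWord wlen fuel freqArr l (r + 1) valid ans
    else ans

def find_word_concatenation (arr : List String) (words : List String) : List Int :=
  let freqWord := words.foldl (fun d w => d.insert w (d.getD w 0 + 1)) PySem.Dict.empty
  findLoopA arr freqWord words.length arr.length PySem.Dict.empty 0 0 0 []

-- ===== PORT B =====
def find_word_concatenation_alt (arr : List String) (words : List String) : List Int :=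
  let k : Int := words.length
  let target := PySem.List.sorted words (fun x => x) false
  (PySem.List.pyRange 0 arr.length 1).filter (fun i =>
    ((PySem.List.slice arr (some i) (some (i + k))).length : Int) == k &&
    PySem.List.sorted (PySem.List.slice arr (some i) (some (i + k))) (fun x => x) false == target)

-- ===== PRECONDITION & SPEC =====
def Spec_find_word_concatenation (arr : List String) (words : List String) (out : List Int) : Prop := out = find_word_concatenation_alt arr words
instance (arr : List String) (words : List String) (out : List Int) : Decidable (Spec_find_word_concatenation arr words out) := by unfold Spec_find_word_concatenation; infer_instance

-- ===== CLAIM (what is proved, stated in full; the proofs are below) =====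
def Claim_equal_find_word_concatenation : Prop := ∀ (arr : List String) (words : List String), Dom_find_word_concatenation arr words → Spec_find_word_concatenation arr words (find_word_concatenation arr words)

-- ===== LEMMAS AND PROOFS =====

-- A's counter dict for words
def pvFreqW (words : List String) : PySem.Dict String Int :=
  words.foldl (fun d w => d.insert w (d.getD w 0 + 1)) PySem.Dict.empty

-- A's left pointer at entry of the iteration that processes arr[r]
def lentF (k r : Nat) : Nat := r - min r (k - 1)

-- window arr[l:r] held by freqArr at entry of iteration r, and arr[l:r+1] at the append check
def winE (arr : List String) (k r : Nat) : List String :=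
  (arr.drop (lentF k r)).take (r - lentF k r)
def winA (arr : List String) (k r : Nat) : List String :=
  (arr.drop (lentF k r)).take (r + 1 - lentF k r)

-- what iteration r contributes to ans
def emitF (arr words : List String) (r : Nat) : Option Int :=
  if ∀ w ∈ words, words.count w ≤ (winA arr words.length r).count w
  then some ((lentF words.length r : Nat) : Int) else none

-- B's windows, as the common normal form both sides are reduced to
def canonL (arr words : List String) : List Int :=
  (List.range arr.length).filterMap
    (fun i => if ((arr.drop i).take words.length).Perm words then some ((i : Nat) : Int) else none)

lemma pvFreqW_getD (words : List String) (w : String) :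
    (pvFreqW words).getD w 0 = (words.count w : Int) := by
  unfold pvFreqW
  rw [PySem.Dict.getD_foldl_insert_add_one]
  simp [PySem.Dict.getD_empty]

lemma pvFreqW_keys (words : List String) : (pvFreqW words).keys = PySem.Set.ofList words := by
  unfold pvFreqW
  rw [PySem.Dict.keys_foldl_insert]
  simp [PySem.Dict.keys_empty, PySem.Set.ofList_eq_foldl, PySem.Set.update]

lemma pvFreqW_contains (words : List String) (w : String) :
    (pvFreqW words).contains w = decide (w ∈ words) := by
  rw [PySem.Dict.contains_eq_decide_mem_keys, pvFreqW_keys]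
  simp [PySem.Set.mem_ofList]

lemma pvFreqW_size (words : List String) :
    (pvFreqW words).size = (PySem.Set.ofList words).length := by
  have h : (pvFreqW words).size = (pvFreqW words).keys.length := by
    simp [PySem.Dict.keys, PySem.Dict.size]
  rw [h, pvFreqW_keys]

lemma countP_shift {α : Type} (l : List α) (p q : α → Bool) (x : α)
    (hx : x ∈ l) (hnd : l.Nodup) (h : ∀ w ∈ l, w ≠ x → p w = q w) :
    (l.countP q : Int) =
      (l.countP p : Int) + (if q x = true then 1 else 0) - (if p x = true then 1 else 0) := by
  induction l with
  | nil => cases hx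
  | cons a t ih =>
    rw [List.countP_cons, List.countP_cons]
    rcases List.mem_cons.1 hx with rfl | hxt
    · have hagree : ∀ w ∈ t, p w = q w := by
        intro w hw
        exact h w (List.mem_cons_of_mem _ hw) (fun hwx => (List.nodup_cons.1 hnd).1 (hwx ▸ hw))
      have ht : t.countP p = t.countP q := List.countP_congr (fun w hw => by rw [hagree w hw])
      rw [ht]
      by_cases hp : p x <;> by_cases hq : q x
      all_goals simp [hp, hq]
    · have hax : a ≠ x := fun hax => (List.nodup_cons.1 hnd).1 (hax ▸ hxt)
      have hpa : p a = q a := h a (List.mem_cons_self) hax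
      have hrec := ih hxt (List.nodup_cons.1 hnd).2 (fun w hw hwx => h w (List.mem_cons_of_mem _ hw) hwx)
      rw [← hpa]
      by_cases hp : p a
      all_goals simp [hp, hrec]
      all_goals ring

lemma count_le_multiset_le {α : Type} [DecidableEq α] (W T : List α)
    (h : ∀ w ∈ T, T.count w ≤ W.count w) : (T : Multiset α) ≤ (W : Multiset α) := by
  rw [Multiset.le_iff_count]
  intro a
  by_cases ha : a ∈ T
  · simpa using h a ha
  · simp [List.count_eq_zero_of_not_mem ha]

lemma count_le_length {α : Type} [DecidableEq α] (W T : List α)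
    (h : ∀ w ∈ T, T.count w ≤ W.count w) : T.length ≤ W.length := by
  have := Multiset.card_le_card (count_le_multiset_le W T h)
  simpa using this

lemma perm_iff_counts {α : Type} [DecidableEq α] (W T : List α) (hlen : W.length ≤ T.length) :
    (∀ w ∈ T, T.count w ≤ W.count w) ↔ W.Perm T := by
  constructor
  · intro h
    have heq : (T : Multiset α) = (W : Multiset α) :=
      Multiset.eq_of_le_of_card_le (count_le_multiset_le W T h) (by simpa using hlen)
    exact (Multiset.coe_eq_coe.1 heq).symm
  · intro hperm w _
    rw [hperm.count_eq]

-- window structure facts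
lemma winA_eq_winE_append (arr : List String) (k r : Nat) (h : r < arr.length) :
    winA arr k r = winE arr k r ++ [arr[r]] := by
  unfold winA winE
  have hle : lentF k r ≤ r := by unfold lentF; omega
  have h1 : r + 1 - lentF k r = (r - lentF k r) + 1 := by omega
  rw [h1, List.take_add_one]
  have h2 : (arr.drop (lentF k r))[r - lentF k r]? = some arr[r] := by
    rw [List.getElem?_drop]
    have h3 : lentF k r + (r - lentF k r) = r := by omega
    rw [h3, List.getElem?_eq_getElem h]
  rw [h2]
  rfl

lemma lentF_succ_ge (k r : Nat) (h : k ≤ r + 1) : lentF k (r + 1) = lentF k r + 1 := by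
  unfold lentF; omega

lemma lentF_succ_lt (k r : Nat) (h : r + 1 < k) : lentF k (r + 1) = lentF k r := by
  unfold lentF; omega

lemma winE_succ_ge (arr : List String) (k r : Nat) (hr : r < arr.length) (h : k ≤ r + 1) :
    winA arr k r = arr.getD (lentF k r) "" :: winE arr k (r + 1) := by
  have hls : lentF k (r + 1) = lentF k r + 1 := lentF_succ_ge k r h
  have hle : lentF k r ≤ r := by unfold lentF; omega
  unfold winA winE
  rw [hls]
  have hlt : lentF k r < arr.length := by omega
  rw [List.drop_eq_getElem_cons hlt]
  have h1 : r + 1 - lentF k r = (r + 1 - (lentF k r + 1)) + 1 := by omega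
  rw [h1, List.take_succ_cons, List.getD_eq_getElem?_getD, List.getElem?_eq_getElem hlt]
  rfl

lemma winE_succ_lt (arr : List String) (k r : Nat) (h : r + 1 < k) :
    winE arr k (r + 1) = winA arr k r := by
  have hls : lentF k (r + 1) = lentF k r := lentF_succ_lt k r h
  unfold winA winE
  rw [hls]

-- generic bridge: a filter-then-map comprehension as a filterMap
lemma filter_map_eq_filterMap {α β : Type} (p : α → Bool) (f : α → β) (l : List α) :
    (l.filter p).map f = l.filterMap (fun a => if p a then some (f a) else none) := by
  induction l with
  | nil => rfl
  | cons a t ih =>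
    by_cases hp : p a <;> simp [hp, ih]

lemma loopA_spec (arr words : List String) :
    ∀ (c r : Nat) (fa : PySem.Dict String Int) (valid : Int) (ans : List Int),
    r + c = arr.length →
    (∀ w ∈ words, fa.getD w 0 = ((winE arr words.length r).count w : Int)) →
    valid = ((PySem.Set.ofList words).countP
               (fun w => decide (words.count w ≤ (winE arr words.length r).count w)) : Int) →
    findLoopA arr (pvFreqW words) words.length c fa (lentF words.length r) r valid ans
      = ans ++ (List.range' r c).filterMap (emitF arr words) := by
  intro c
  induction c with
  | zero =>
    intro r fa valid ans h1 _ _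
    rw [findLoopA]
    simp
  | succ c ih =>
    intro r fa valid ans h1 hfa hv
    have hr : r < arr.length := by omega
    have hnd : (PySem.Set.ofList words).Nodup := PySem.Set.nodup_ofList words
    have hwinA : winA arr words.length r = winE arr words.length r ++ [arr[r]] :=
      winA_eq_winE_append arr words.length r hr
    have hcA_ne : ∀ w, w ≠ arr[r] →
        (winA arr words.length r).count w = (winE arr words.length r).count w := by
      intro w hw
      rw [hwinA, List.count_append]
      have : List.count w [arr[r]] = 0 := List.count_eq_zero.2 (by simp [hw])
      omega
    have hcA_x : (winA arr words.length r).count arr[r]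
        = (winE arr words.length r).count arr[r] + 1 := by
      rw [hwinA, List.count_append]
      simp
    -- the condition of the append test equals the emit condition
    have hcond : ∀ v : Int,
        v = ((PySem.Set.ofList words).countP
              (fun w => decide (words.count w ≤ (winA arr words.length r).count w)) : Int) →
        (v == ((pvFreqW words).size : Int))
          = decide (∀ w ∈ words, words.count w ≤ (winA arr words.length r).count w) := by
      intro v hv1
      rw [hv1, pvFreqW_size, Bool.beq_eq_decide_eq]
      rw [decide_eq_decide]
      rw [Nat.cast_inj]
      rw [List.countP_eq_length]
      constructor
      · intro hall w hw
        have := hall w ((PySem.Set.mem_ofList words w).2 hw)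
        exact of_decide_eq_true this
      · intro hall w hw
        exact decide_eq_true (hall w ((PySem.Set.mem_ofList words w).1 hw))
    -- the common continuation after the add, for any dict satisfying the winA invariant
    have step : ∀ (fa1 : PySem.Dict String Int),
        (∀ w ∈ words, fa1.getD w 0 = ((winA arr words.length r).count w : Int)) →
        (if r + 1 ≥ words.length then
          findLoopA arr (pvFreqW words) words.length c
            (if decide (arr.getD (lentF words.length r) "" ∈ words) = true then
                (fa1.insert (arr.getD (lentF words.length r) "")
                   (fa1.getD (arr.getD (lentF words.length r) "") 0 - 1),
                 if (fa1.getD (arr.getD (lentF words.length r) "") 0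
                      == ((words.count (arr.getD (lentF words.length r) "") : Nat) : Int)) = true then
                   ((PySem.Set.ofList words).countP
                     (fun w => decide (words.count w ≤ (winA arr words.length r).count w)) : Int) - 1
                 else
                   ((PySem.Set.ofList words).countP
                     (fun w => decide (words.count w ≤ (winA arr words.length r).count w)) : Int))
              else (fa1,
                 ((PySem.Set.ofList words).countP
                   (fun w => decide (words.count w ≤ (winA arr words.length r).count w)) : Int))).1
            (lentF words.length r + 1) (r + 1)
            (if decide (arr.getD (lentF words.length r) "" ∈ words) = true then
                (fa1.insert (arr.getD (lentF words.length r) "")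
                   (fa1.getD (arr.getD (lentF words.length r) "") 0 - 1),
                 if (fa1.getD (arr.getD (lentF words.length r) "") 0
                      == ((words.count (arr.getD (lentF words.length r) "") : Nat) : Int)) = true then
                   ((PySem.Set.ofList words).countP
                     (fun w => decide (words.count w ≤ (winA arr words.length r).count w)) : Int) - 1
                 else
                   ((PySem.Set.ofList words).countP
                     (fun w => decide (words.count w ≤ (winA arr words.length r).count w)) : Int))
              else (fa1,
                 ((PySem.Set.ofList words).countP
                   (fun w => decide (words.count w ≤ (winA arr words.length r).count w)) : Int))).2
            (if decide (∀ w ∈ words, words.count w ≤ (winA arr words.length r).count w) = true then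
              ans ++ [((lentF words.length r : Nat) : Int)] else ans)
        else
          findLoopA arr (pvFreqW words) words.length c fa1 (lentF words.length r) (r + 1)
            ((PySem.Set.ofList words).countP
              (fun w => decide (words.count w ≤ (winA arr words.length r).count w)) : Int)
            (if decide (∀ w ∈ words, words.count w ≤ (winA arr words.length r).count w) = true then
              ans ++ [((lentF words.length r : Nat) : Int)] else ans))
        = ans ++ (List.range' r (c+1)).filterMap (emitF arr words) := by
      intro fa1 hfa1
      have hemit :
          (if decide (∀ w ∈ words, words.count w ≤ (winA arr words.length r).count w) = true then
              ans ++ [((lentF words.length r : Nat) : Int)] else ans)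
            ++ (List.range' (r+1) c).filterMap (emitF arr words)
          = ans ++ (List.range' r (c+1)).filterMap (emitF arr words) := by
        rw [List.range'_succ, List.filterMap_cons]
        simp only [emitF, decide_eq_true_eq]
        by_cases hC : ∀ w ∈ words, words.count w ≤ (winA arr words.length r).count w
        · rw [if_pos hC, if_pos hC]
          try simp
        · rw [if_neg hC, if_neg hC]
          try simp
      by_cases hge : r + 1 ≥ words.length
      · rw [if_pos hge]
        have hwd : winA arr words.length r
            = arr.getD (lentF words.length r) "" :: winE arr words.length (r + 1) :=
          winE_succ_ge arr words.length r hr hge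
        have hcE_ne : ∀ w, w ≠ arr.getD (lentF words.length r) "" →
            (winE arr words.length (r+1)).count w = (winA arr words.length r).count w := by
          intro w hw
          have hbd : (arr.getD (lentF words.length r) "" == w) = false := beq_eq_false_iff_ne.2 (Ne.symm hw)
          rw [hwd, List.count_cons, hbd]
          simp
        have hcE_d : (winA arr words.length r).count (arr.getD (lentF words.length r) "")
            = (winE arr words.length (r+1)).count (arr.getD (lentF words.length r) "") + 1 := by
          rw [hwd, List.count_cons, beq_self_eq_true]
          simp
        by_cases hdm : arr.getD (lentF words.length r) "" ∈ words
        · simp only [hdm, decide_true, if_true]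
          rw [hfa1 _ hdm]
          -- valid after the remove
          have hv2 : (if (((winA arr words.length r).count (arr.getD (lentF words.length r) "") : Int)
                == ((words.count (arr.getD (lentF words.length r) "") : Nat) : Int)) = true then
                ((PySem.Set.ofList words).countP
                  (fun w => decide (words.count w ≤ (winA arr words.length r).count w)) : Int) - 1
              else
                ((PySem.Set.ofList words).countP
                  (fun w => decide (words.count w ≤ (winA arr words.length r).count w)) : Int))
              = ((PySem.Set.ofList words).countP
                  (fun w => decide (words.count w ≤ (winE arr words.length (r+1)).count w)) : Int) := by
            have hdK : arr.getD (lentF words.length r) "" ∈ PySem.Set.ofList words :=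
              (PySem.Set.mem_ofList words _).2 hdm
            have hagree2 : ∀ w ∈ PySem.Set.ofList words, w ≠ arr.getD (lentF words.length r) "" →
                (fun w => decide (words.count w ≤ (winA arr words.length r).count w)) w
                  = (fun w => decide (words.count w ≤ (winE arr words.length (r+1)).count w)) w := by
              intro w _ hw
              simp only [hcE_ne w hw]
            have hshift2 := countP_shift (PySem.Set.ofList words)
              (fun w => decide (words.count w ≤ (winA arr words.length r).count w))
              (fun w => decide (words.count w ≤ (winE arr words.length (r+1)).count w))
              (arr.getD (lentF words.length r) "") hdK hnd hagree2
            simp only [decide_eq_true_eq] at hshift2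
            rw [hcE_d] at hshift2
            by_cases ht : words.count (arr.getD (lentF words.length r) "")
                = (winE arr words.length (r+1)).count (arr.getD (lentF words.length r) "") + 1
            · rw [if_neg (by omega), if_pos (by omega)] at hshift2
              have hbeq : (((winA arr words.length r).count (arr.getD (lentF words.length r) "") : Int)
                  == ((words.count (arr.getD (lentF words.length r) "") : Nat) : Int)) = true := by
                rw [Bool.beq_eq_decide_eq, decide_eq_true_eq, hcE_d]
                omega
              simp only [hbeq, if_true]
              omega
            · have hbeq : (((winA arr words.length r).count (arr.getD (lentF words.length r) "") : Int)
                  == ((words.count (arr.getD (lentF words.length r) "") : Nat) : Int)) = false := by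
                rw [Bool.beq_eq_decide_eq, decide_eq_false_iff_not, hcE_d]
                omega
              simp only [hbeq, Bool.false_eq_true, if_false]
              by_cases h2 : words.count (arr.getD (lentF words.length r) "")
                  ≤ (winE arr words.length (r+1)).count (arr.getD (lentF words.length r) "")
              · rw [if_pos (by omega), if_pos (by omega)] at hshift2
                omega
              · rw [if_neg (by omega), if_neg (by omega)] at hshift2
                omega
          rw [hv2]
          have hfa2 : ∀ w ∈ words,
              (fa1.insert (arr.getD (lentF words.length r) "")
                (((winA arr words.length r).count (arr.getD (lentF words.length r) "") : Int) - 1)).getD w 0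
              = ((winE arr words.length (r+1)).count w : Int) := by
            intro w hw
            rw [PySem.Dict.getD_insert]
            by_cases hwd2 : w = arr.getD (lentF words.length r) ""
            · subst hwd2
              rw [if_pos rfl, hcE_d]
              push_cast
              ring
            · rw [if_neg hwd2, hfa1 w hw, hcE_ne w hwd2]
          have := ih (r+1) _ _
            ((if decide (∀ w ∈ words, words.count w ≤ (winA arr words.length r).count w) = true then
              ans ++ [((lentF words.length r : Nat) : Int)] else ans)) (by omega) hfa2 rfl
          rw [lentF_succ_ge words.length r hge] at this
          rw [this, hemit]
        · simp only [hdm, decide_false, Bool.false_eq_true, if_false]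
          have hfa2 : ∀ w ∈ words, fa1.getD w 0 = ((winE arr words.length (r+1)).count w : Int) := by
            intro w hw
            rw [hfa1 w hw, hcE_ne w (fun hwx => hdm (hwx ▸ hw))]
          have hv2 : ((PySem.Set.ofList words).countP
                (fun w => decide (words.count w ≤ (winA arr words.length r).count w)) : Int)
              = ((PySem.Set.ofList words).countP
                (fun w => decide (words.count w ≤ (winE arr words.length (r+1)).count w)) : Int) := by
            congr 1
            apply List.countP_congr
            intro w hw
            have hwx : w ≠ arr.getD (lentF words.length r) "" :=
              fun hwx => hdm (hwx ▸ (PySem.Set.mem_ofList words w).1 hw)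
            simp only [hcE_ne w hwx]
          rw [hv2]
          have := ih (r+1) _ _
            ((if decide (∀ w ∈ words, words.count w ≤ (winA arr words.length r).count w) = true then
              ans ++ [((lentF words.length r : Nat) : Int)] else ans)) (by omega) hfa2 rfl
          rw [lentF_succ_ge words.length r hge] at this
          rw [this, hemit]
      · rw [if_neg hge]
        have hlt : r + 1 < words.length := by omega
        have hwd : winE arr words.length (r+1) = winA arr words.length r :=
          winE_succ_lt arr words.length r hlt
        have hfa2 : ∀ w ∈ words, fa1.getD w 0 = ((winE arr words.length (r+1)).count w : Int) := by
          intro w hw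
          rw [hfa1 w hw, hwd]
        have hv2 : ((PySem.Set.ofList words).countP
              (fun w => decide (words.count w ≤ (winA arr words.length r).count w)) : Int)
            = ((PySem.Set.ofList words).countP
              (fun w => decide (words.count w ≤ (winE arr words.length (r+1)).count w)) : Int) := by
          rw [hwd]
        rw [hv2]
        have := ih (r+1) _ _
          ((if decide (∀ w ∈ words, words.count w ≤ (winA arr words.length r).count w) = true then
            ans ++ [((lentF words.length r : Nat) : Int)] else ans)) (by omega) hfa2 rfl
        rw [lentF_succ_lt words.length r hlt] at this
        rw [this, hemit]
    rw [findLoopA, dif_pos hr]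
    by_cases hmem : arr[r] ∈ words
    -- ============ arr[r] ∈ freqWord ============
    · have hxK : arr[r] ∈ PySem.Set.ofList words := (PySem.Set.mem_ofList words arr[r]).2 hmem
      simp only [pvFreqW_contains, hmem, decide_true, if_true, PySem.Dict.getD_insert_self,
        pvFreqW_getD, hfa arr[r] hmem]
      -- invariant of freqArr after the add
      have hfa1 : ∀ w ∈ words,
          (fa.insert arr[r] (((winE arr words.length r).count arr[r] : Int) + 1)).getD w 0
            = ((winA arr words.length r).count w : Int) := by
        intro w hw
        rw [PySem.Dict.getD_insert]
        by_cases hwx : w = arr[r]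
        · subst hwx; simp [hcA_x]
        · rw [if_neg hwx, hfa w hw, hcA_ne w hwx]
      -- invariant of valid after the add
      have hv1 : (if (((winE arr words.length r).count arr[r] : Int) + 1
              == ((words.count arr[r] : Nat) : Int)) = true then valid + 1 else valid)
          = ((PySem.Set.ofList words).countP
              (fun w => decide (words.count w ≤ (winA arr words.length r).count w)) : Int) := by
        have hagree : ∀ w ∈ PySem.Set.ofList words, w ≠ arr[r] →
            (fun w => decide (words.count w ≤ (winE arr words.length r).count w)) w
              = (fun w => decide (words.count w ≤ (winA arr words.length r).count w)) w := by
          intro w _ hw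
          simp only [hcA_ne w hw]
        have hshift := countP_shift (PySem.Set.ofList words)
          (fun w => decide (words.count w ≤ (winE arr words.length r).count w))
          (fun w => decide (words.count w ≤ (winA arr words.length r).count w))
          arr[r] hxK hnd hagree
        simp only [decide_eq_true_eq] at hshift
        rw [hcA_x] at hshift
        rw [hv]
        by_cases ht : words.count arr[r] = (winE arr words.length r).count arr[r] + 1
        · rw [if_pos (by omega), if_neg (by omega)] at hshift
          have hbeq : (((winE arr words.length r).count arr[r] : Int) + 1
              == ((words.count arr[r] : Nat) : Int)) = true := by
            rw [Bool.beq_eq_decide_eq, decide_eq_true_eq]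
            omega
          simp only [hbeq, if_true]
          omega
        · have hbeq : (((winE arr words.length r).count arr[r] : Int) + 1
              == ((words.count arr[r] : Nat) : Int)) = false := by
            rw [Bool.beq_eq_decide_eq, decide_eq_false_iff_not]
            omega
          simp only [hbeq, Bool.false_eq_true, if_false]
          by_cases h2 : words.count arr[r] ≤ (winE arr words.length r).count arr[r]
          · rw [if_pos (by omega), if_pos (by omega)] at hshift
            omega
          · rw [if_neg (by omega), if_neg (by omega)] at hshift
            omega
      rw [hv1, hcond _ rfl]
      exact step _ hfa1
    -- ============ arr[r] ∉ freqWord ============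
    · simp only [pvFreqW_contains, hmem, decide_false, Bool.false_eq_true, if_false, pvFreqW_getD]
      have hfa1 : ∀ w ∈ words, fa.getD w 0 = ((winA arr words.length r).count w : Int) := by
        intro w hw
        rw [hfa w hw, hcA_ne w (fun hwx => hmem (hwx ▸ hw))]
      have hv1 : valid = ((PySem.Set.ofList words).countP
          (fun w => decide (words.count w ≤ (winA arr words.length r).count w)) : Int) := by
        rw [hv]
        congr 1
        apply List.countP_congr
        intro w hw
        have hwx : w ≠ arr[r] := fun hwx => hmem (hwx ▸ (PySem.Set.mem_ofList words w).1 hw)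
        simp only [hcA_ne w hwx]
      rw [hv1, hcond _ rfl]
      exact step _ hfa1

-- reindexing A's emissions to B's windows
lemma emit_eq_canon (arr words : List String) :
    (List.range' 0 arr.length).filterMap (emitF arr words) = canonL arr words := by
  rcases Nat.eq_zero_or_pos words.length with hk0 | hkpos
  · -- words = []: every iteration emits its own index, every window matches
    unfold canonL
    rw [← List.range_eq_range']
    apply List.filterMap_congr
    intro r _
    unfold emitF
    rw [if_pos (by intro w hw; rw [List.length_eq_zero_iff.1 hk0] at hw; cases hw)]
    rw [if_pos (by rw [hk0]; simp [List.length_eq_zero_iff.1 hk0])]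
    have : lentF words.length r = r := by unfold lentF; omega
    rw [this]
  · -- words nonempty
    have hnone_small : ∀ r, r + 1 < words.length → emitF arr words r = none := by
      intro r hr
      unfold emitF
      rw [if_neg]
      intro hC
      have hlen := count_le_length (winA arr words.length r) words hC
      have hl0 : lentF words.length r = 0 := by unfold lentF; omega
      have : (winA arr words.length r).length ≤ r + 1 := by
        unfold winA
        rw [hl0]
        simp
      omega
    have hcanon_none : ∀ i : Nat, arr.length < i + words.length →
        (if ((arr.drop i).take words.length).Perm words
         then some ((i : Nat) : Int) else none) = none := by
      intro i hi
      rw [if_neg]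
      intro hperm
      have := hperm.length_eq
      rw [List.length_take, List.length_drop] at this
      omega
    rcases Nat.lt_or_ge arr.length (words.length - 1) with hnk | hkn
    · -- array shorter than k-1: nothing is emitted on either side
      rw [List.filterMap_eq_nil_iff.mpr (by
        intro r hrmem
        have hrlt : r < arr.length := by
          have := List.mem_range'_1.1 hrmem
          omega
        exact hnone_small r (by omega))]
      unfold canonL
      rw [List.filterMap_eq_nil_iff.mpr (by
        intro i himem
        have hilt : i < arr.length := List.mem_range.1 himem
        exact hcanon_none i (by omega))]
    · -- split A's iterations at k-1, reindex the rest by r = (k-1) + i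
      have hsplit : List.range' 0 arr.length
          = List.range' 0 (words.length - 1)
            ++ List.range' (words.length - 1) (arr.length - (words.length - 1)) := by
        have h2 : words.length - 1 + (arr.length - (words.length - 1)) = arr.length := by omega
        rw [← h2, ← List.range'_append_1]
        norm_num
      rw [hsplit, List.filterMap_append]
      rw [List.filterMap_eq_nil_iff.mpr (by
        intro r hrmem
        have := List.mem_range'_1.1 hrmem
        exact hnone_small r (by omega))]
      rw [List.nil_append, List.range'_eq_map_range, List.filterMap_map]
      unfold canonL
      have hsplit2 : List.range arr.length
          = List.range' 0 (arr.length - (words.length - 1))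
            ++ List.range' (arr.length - (words.length - 1))
                (arr.length - (arr.length - (words.length - 1))) := by
        have h2 : arr.length - (words.length - 1)
            + (arr.length - (arr.length - (words.length - 1))) = arr.length := by omega
        rw [List.range_eq_range']
        conv_lhs => rw [← h2]
        rw [← List.range'_append_1]
        norm_num
      rw [hsplit2, List.filterMap_append]
      have hnil2 : List.filterMap
          (fun i => if ((arr.drop i).take words.length).Perm words then some ((i : Nat) : Int) else none)
          (List.range' (arr.length - (words.length - 1))
            (arr.length - (arr.length - (words.length - 1)))) = [] :=
        List.filterMap_eq_nil_iff.mpr (fun i himem => by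
          have := List.mem_range'_1.1 himem
          exact hcanon_none i (by omega))
      rw [hnil2, List.append_nil, ← List.range_eq_range']
      apply List.filterMap_congr
      intro i _
      unfold Function.comp emitF
      have hl : lentF words.length (words.length - 1 + i) = i := by unfold lentF; omega
      have hw : winA arr words.length (words.length - 1 + i) = (arr.drop i).take words.length := by
        unfold winA
        rw [hl]
        congr 1
        omega
      rw [hl, hw]
      exact if_congr
        (perm_iff_counts _ words (by
          simp))
        rfl rfl

-- B reduces to the same normal form
lemma alt_eq_canon (arr words : List String) :
    find_word_concatenation_alt arr words = canonL arr words := by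
  unfold find_word_concatenation_alt canonL
  rw [PySem.List.pyRange_zero_nat, List.filter_map, filter_map_eq_filterMap]
  apply List.filterMap_congr
  intro j _
  have hsl : PySem.List.slice arr (some ((j : Nat) : Int))
      (some (((j : Nat) : Int) + ((words.length : Nat) : Int))) = (arr.drop j).take words.length :=
    PySem.List.slice_natCast_add arr j words.length
  simp only [Function.comp, hsl]
  by_cases hperm : ((arr.drop j).take words.length).Perm words
  · have hlen : ((arr.drop j).take words.length).length = words.length := hperm.length_eq
    have hsorted : (PySem.List.sorted ((arr.drop j).take words.length) (fun x => x) false)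
        = PySem.List.sorted words (fun x => x) false :=
      (PySem.List.sorted_id_eq_sorted_id_iff_perm _ _).2 hperm
    rw [if_pos hperm, if_pos]
    rw [hlen, hsorted]
    simp
  · rw [if_neg hperm, if_neg]
    intro hcond
    rcases Bool.and_eq_true_iff.1 hcond with ⟨h1, h2⟩
    exact hperm ((PySem.List.sorted_id_eq_sorted_id_iff_perm _ _).1 (eq_of_beq h2))

-- ===== VERDICT (by name: the statement is the Claim_ definition above) =====
theorem find_word_concatenation_spec : Claim_equal_find_word_concatenation := by
  intro arr words _
  unfold Spec_find_word_concatenation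
  have hA : find_word_concatenation arr words
      = (List.range' 0 arr.length).filterMap (emitF arr words) := by
    have := loopA_spec arr words arr.length 0 PySem.Dict.empty 0 []
      (by omega)
      (by intro w _; simp [winE, PySem.Dict.getD_empty])
      (by
        have hfalse : ∀ w ∈ PySem.Set.ofList words,
            (decide (words.count w ≤ (winE arr words.length 0).count w)) = false := by
          intro w hw
          have hw' : w ∈ words := (PySem.Set.mem_ofList words w).1 hw
          have : 0 < words.count w := List.count_pos_iff.2 hw'
          simp [winE]
          omega
        rw [List.countP_eq_zero.2 (by intro a ha; simp only [hfalse a ha]; exact fun h => by cases h)]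
        simp)
    simpa [find_word_concatenation, pvFreqW, lentF] using this
  rw [hA, emit_eq_canon, alt_eq_canon]
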